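-- pv_equiv track=rewrite | github.com/twyllie/practicing | mathPuzzles/mathPuzzles_play.py | dataTriangleBuider
-- ===== SOURCE A (Python) =====
-- def dataTriangleBuider(data, gridsize):
--     dataIndex = 0
--     data = data.split()
--     dataTriangle = []
--     dataIndex = 0
--     for num in range(0, gridsize):
--         dataTriangle.append([])
--         for otherNum in range(0, gridsize):
--             dataTriangle[num].append('*')
--     for y in range(0, gridsize):
--         for x in range(0, gridsize):
--             offset = y+2
--             if(x > gridsize-offset):
--                 dataTriangle[x][y] = data[dataIndex]
--                 dataIndex += 1
--     return dataTriangle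
-- ===== SOURCE B (Python) =====
-- def dataTriangleBuider(data, gridsize):
--     tokens = data.split()
--     # Row-major construction with a closed-form index: cell (r, c) is inside the
--     # triangle iff r + c + 1 >= gridsize, and it is the (c*(c+1)//2 + r + c + 1 - gridsize)-th
--     # token consumed by A's column-major scan.
--     return [['*' if c < gridsize - 1 - r
--              else tokens[c * (c + 1) // 2 + r + c + 1 - gridsize]
--              for c in range(gridsize)]
--             for r in range(gridsize)]
-- ===== Notes on version B (the rewrite author's own statement) =====
-- stated objective: simpler
-- what changed: Replaces the mutable grid, the running data index and the per-cell branch over a column-major scan by a pure row-major nested comprehension that computes each cell's token position in closed form (c*(c+1)//2 + r + c + 1 - gridsize).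
import Mathlib
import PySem

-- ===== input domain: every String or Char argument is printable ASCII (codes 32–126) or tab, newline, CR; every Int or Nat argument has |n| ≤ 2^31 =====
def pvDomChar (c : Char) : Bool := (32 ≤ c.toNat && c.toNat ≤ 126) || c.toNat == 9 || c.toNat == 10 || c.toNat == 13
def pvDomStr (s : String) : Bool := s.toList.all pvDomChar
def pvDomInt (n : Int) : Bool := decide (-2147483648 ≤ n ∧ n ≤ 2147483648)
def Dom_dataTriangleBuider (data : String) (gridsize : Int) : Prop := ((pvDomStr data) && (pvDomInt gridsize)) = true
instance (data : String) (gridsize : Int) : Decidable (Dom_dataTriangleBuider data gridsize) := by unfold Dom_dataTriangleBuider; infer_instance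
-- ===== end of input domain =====

-- B builds the grid row-major as a pure nested comprehension with a closed-form token
-- index, instead of A's mutable grid, running counter and per-cell branch (objective: simpler).
-- A mutates only its own fresh lists, so return-value equivalence is full equivalence.

-- ===== PORT A =====
-- literal transliteration of A: build grid by repeated append (indices are loop
-- variables, always in range, so pySetD/pyGetD are exact), then the column-major
-- fill over state (grid, dataIndex); data[dataIndex] is pyGetD, exact under Pre_.
def dataTriangleBuider (data : String) (gridsize : Int) : List (List String) :=
  let dataL := PySem.Str.split₀ data
  let dataTriangle : List (List String) :=
    (PySem.List.pyRange 0 gridsize 1).foldl (fun dt num =>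
      let dt := dt ++ [[]]
      (PySem.List.pyRange 0 gridsize 1).foldl (fun dt _otherNum =>
        PySem.List.pySetD dt num (PySem.List.pyGetD dt num [] ++ ["*"])) dt) []
  let st : List (List String) × Int :=
    (PySem.List.pyRange 0 gridsize 1).foldl (fun st y =>
      (PySem.List.pyRange 0 gridsize 1).foldl (fun (st : List (List String) × Int) x =>
        let offset := y + 2
        if x > gridsize - offset then
          (PySem.List.pySetD st.1 x
            (PySem.List.pySetD (PySem.List.pyGetD st.1 x []) y
              (PySem.List.pyGetD dataL st.2 "")), st.2 + 1)
        else st) st) (dataTriangle, 0)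
  st.1

-- ===== PORT B =====
def dataTriangleBuider_alt (data : String) (gridsize : Int) : List (List String) :=
  let tokens := PySem.Str.split₀ data
  (PySem.List.pyRange 0 gridsize 1).map (fun r =>
    (PySem.List.pyRange 0 gridsize 1).map (fun c =>
      if c < gridsize - 1 - r then "*"
      else PySem.List.pyGetD tokens
        (PySem.Int.floordiv (c * (c + 1)) 2 + r + c + 1 - gridsize) ""))

-- ===== PRECONDITION & SPEC =====
-- Pre_ excludes exactly the inputs where Python A raises IndexError: the fill consumes
-- gridsize*(gridsize+1)/2 whitespace-separated tokens, so data must supply at least that many.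
def Pre_dataTriangleBuider (data : String) (gridsize : Int) : Prop :=
  gridsize ≤ 0 ∨ gridsize * (gridsize + 1) ≤ 2 * ((PySem.Str.split₀ data).length : Int)
instance (data : String) (gridsize : Int) : Decidable (Pre_dataTriangleBuider data gridsize) := by
  unfold Pre_dataTriangleBuider; infer_instance
def pvWitness_dataTriangleBuider : String × Int := ("a b c", 2)

def Spec_dataTriangleBuider (data : String) (gridsize : Int) (out : List (List String)) : Prop := out = dataTriangleBuider_alt data gridsize
instance (data : String) (gridsize : Int) (out : List (List String)) : Decidable (Spec_dataTriangleBuider data gridsize out) := by unfold Spec_dataTriangleBuider; infer_instance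

-- ===== CLAIM (what is proved, stated in full; the proofs are below) =====
def Claim_equal_dataTriangleBuider : Prop := ∀ (data : String) (gridsize : Int), Dom_dataTriangleBuider data gridsize → Pre_dataTriangleBuider data gridsize → Spec_dataTriangleBuider data gridsize (dataTriangleBuider data gridsize)

-- ===== LEMMAS AND PROOFS =====

-- triangular numbers: tokens consumed by A before column c
def pvTri : Nat → Nat
  | 0 => 0
  | m + 1 => pvTri m + (m + 1)

theorem pvTri_eq (m : Nat) : 2 * pvTri m = m * (m + 1) := by
  induction m with
  | zero => rfl
  | succ k ih => simp only [pvTri]; ring_nf; ring_nf at ih; omega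

-- the common cell value both programs compute at row r, column c (n = gridsize.toNat)
def pvCell (toks : List String) (n r c : Nat) : String :=
  if r + c + 1 < n then "*" else toks.getD (pvTri c + (r + c + 1 - n)) ""

theorem set_map_range {α : Type} (n j : Nat) (f : Nat → α) (v : α) (hj : j < n) :
    ((List.range n).map f).set j v
      = (List.range n).map (fun r => if r = j then v else f r) := by
  apply List.ext_getElem (by simp)
  intro k h1 h2
  simp only [List.getElem_set, List.getElem_map, List.getElem_range]
  by_cases hk : k = j
  · subst hk; simp
  · rw [if_neg (Ne.symm hk), if_neg hk]

theorem getD_map_range' {α : Type} [Inhabited α] (n j : Nat) (f : Nat → α) (d : α) (hj : j < n) :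
    ((List.range n).map f).getD j d = f j := by
  rw [List.getD_eq_getElem?_getD]
  simp [List.getElem?_map, List.getElem?_range, hj]

-- building one row of the initial grid: n appends of '*' to the freshly appended row
theorem initA_row (n : Nat) (pre : List (List String)) (row : List String) :
    (List.range n).foldl
        (fun dt _ => dt.set pre.length ((dt.getD pre.length []) ++ ["*"])) (pre ++ [row])
      = pre ++ [row ++ List.replicate n "*"] := by
  induction n with
  | zero => simp
  | succ k ih =>
      rw [List.range_succ, List.foldl_append, ih]
      simp only [List.foldl_cons, List.foldl_nil]
      rw [List.getD_append_right _ _ _ _ (le_refl _),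
          List.set_append_right _ _ (le_refl _)]
      simp [List.replicate_succ']
  
-- the initial grid is n rows of n stars
theorem initA_grid (n m : Nat) (hm : m ≤ n) :
    (List.range m).foldl
        (fun dt (num : Nat) =>
          (List.range n).foldl
            (fun dt _ => PySem.List.pySetD dt (num : Int)
                (PySem.List.pyGetD dt (num : Int) [] ++ ["*"])) (dt ++ [[]])) []
      = List.replicate m (List.replicate n "*") := by
  induction m with
  | zero => simp
  | succ k ih =>
      rw [List.range_succ, List.foldl_append, ih (by omega)]
      simp only [List.foldl_cons, List.foldl_nil]
      have hlen : (List.replicate k (List.replicate n "*")).length = k := by simp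
      calc (List.range n).foldl
            (fun dt _ => PySem.List.pySetD dt (k : Int)
                (PySem.List.pyGetD dt (k : Int) [] ++ ["*"]))
            (List.replicate k (List.replicate n "*") ++ [[]])
          = (List.range n).foldl
            (fun dt _ => dt.set (List.replicate k (List.replicate n "*")).length
                ((dt.getD (List.replicate k (List.replicate n "*")).length []) ++ ["*"]))
            (List.replicate k (List.replicate n "*") ++ [[]]) := by
              simp [hlen]
        _ = _ := by
              rw [initA_row]
              simp [List.replicate_succ']

-- processing one column c of the fill loop: prefix of j rows done
theorem fillA_col_aux (toks : List String) (n c i : Nat) (hc : c < n) (G : Nat → Nat → String)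
    (j : Nat) (hj : j ≤ n) :
    (List.range j).foldl
        (fun (st : List (List String) × Int) (x : Nat) =>
          if (x : Int) > (n : Int) - ((c : Int) + 2) then
            (PySem.List.pySetD st.1 (x : Int)
              (PySem.List.pySetD (PySem.List.pyGetD st.1 (x : Int) []) (c : Int)
                (PySem.List.pyGetD toks st.2 "")), st.2 + 1)
          else st)
        ((List.range n).map (fun r => (List.range n).map (G r)), (i : Int))
      = ((List.range n).map (fun r => (List.range n).map (fun c' =>
            if c' = c ∧ n ≤ r + c + 1 ∧ r < j then toks.getD (i + (r + c + 1 - n)) "" else G r c')),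
         ((i + (j - (n - 1 - c)) : Nat) : Int)) := by
  induction j with
  | zero =>
      simp only [List.range_zero, List.foldl_nil, Nat.sub_zero]
      simp only [Prod.mk.injEq]; constructor
      · apply List.map_congr_left; intro r _
        apply List.map_congr_left; intro c' _
        simp
      · simp
  | succ j ih =>
      rw [List.range_succ, List.foldl_append, ih (by omega)]
      simp only [List.foldl_cons, List.foldl_nil]
      by_cases hfire : (j : Int) > (n : Int) - ((c : Int) + 2)
      · have hjn : n ≤ j + c + 1 := by omega
        rw [if_pos hfire]
        simp only [PySem.List.pySetD_natCast, PySem.List.pyGetD_natCast]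
        rw [getD_map_range' n j _ _ (by omega)]
        rw [set_map_range n c _ _ hc, set_map_range n j _ _ (by omega)]
        simp only [Prod.mk.injEq]; constructor
        · apply List.map_congr_left; intro r hr
          rw [List.mem_range] at hr
          by_cases hrj : r = j
          · subst hrj
            rw [if_pos rfl]
            apply List.map_congr_left; intro c' hc'
            by_cases hcc : c' = c
            · subst hcc
              rw [if_pos rfl, if_pos ⟨rfl, hjn, by omega⟩]
              congr 1
              omega
            · rw [if_neg hcc, if_neg (by simp [hcc]), if_neg (by simp [hcc])]
          · rw [if_neg hrj]
            apply List.map_congr_left; intro c' hc'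
            by_cases h1 : c' = c ∧ n ≤ r + c + 1 ∧ r < j
            · rw [if_pos h1, if_pos ⟨h1.1, h1.2.1, by omega⟩]
            · rw [if_neg h1, if_neg (by rintro ⟨a, b, d⟩; exact h1 ⟨a, b, by omega⟩)]
        · push_cast
          omega
      · have hjn : j + c + 2 ≤ n := by omega
        rw [if_neg hfire]
        simp only [Prod.mk.injEq]; constructor
        · apply List.map_congr_left; intro r hr
          apply List.map_congr_left; intro c' hc'
          by_cases h1 : c' = c ∧ n ≤ r + c + 1 ∧ r < j
          · rw [if_pos h1, if_pos ⟨h1.1, h1.2.1, by omega⟩]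
          · rw [if_neg h1, if_neg (by rintro ⟨a, b, d⟩; exact h1 ⟨a, b, by omega⟩)]
        · congr 1
          omega

-- the whole fill: columns 0..m-1 done
theorem fillA_all (toks : List String) (n m : Nat) (hm : m ≤ n) :
    (List.range m).foldl
        (fun (st : List (List String) × Int) (y : Nat) =>
          (List.range n).foldl
            (fun (st : List (List String) × Int) (x : Nat) =>
              if (x : Int) > (n : Int) - ((y : Int) + 2) then
                (PySem.List.pySetD st.1 (x : Int)
                  (PySem.List.pySetD (PySem.List.pyGetD st.1 (x : Int) []) (y : Int)
                    (PySem.List.pyGetD toks st.2 "")), st.2 + 1)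
              else st) st)
        (List.replicate n (List.replicate n "*"), (0 : Int))
      = ((List.range n).map (fun r => (List.range n).map (fun c =>
            if c < m ∧ n ≤ r + c + 1 then toks.getD (pvTri c + (r + c + 1 - n)) "" else "*")),
         ((pvTri m : Nat) : Int)) := by
  induction m with
  | zero =>
      simp only [List.range_zero, List.foldl_nil, pvTri]
      simp only [Prod.mk.injEq]; constructor
      · rw [show (List.range n).map (fun r => (List.range n).map (fun c =>
              if c < 0 ∧ n ≤ r + c + 1 then toks.getD (pvTri c + (r + c + 1 - n)) "" else "*"))
            = (List.range n).map (fun _ => (List.range n).map (fun _ => "*")) by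
              apply List.map_congr_left; intro r _
              apply List.map_congr_left; intro c _
              simp]
        simp [List.map_const]
      · rfl
  | succ m ih =>
      rw [List.range_succ, List.foldl_append, ih (by omega)]
      simp only [List.foldl_cons, List.foldl_nil]
      have hmn : m < n := by omega
      have := fillA_col_aux toks n m (pvTri m) hmn
        (fun r c' => if c' < m ∧ n ≤ r + c' + 1 then toks.getD (pvTri c' + (r + c' + 1 - n)) "" else "*")
        n le_rfl
      rw [this]
      simp only [Prod.mk.injEq]; constructor
      · apply List.map_congr_left; intro r hr
        rw [List.mem_range] at hr
        apply List.map_congr_left; intro c' hc'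
        rw [List.mem_range] at hc'
        by_cases hcc : c' = m
        · subst hcc
          by_cases h2 : n ≤ r + c' + 1
          · rw [if_pos ⟨rfl, h2, hr⟩, if_pos ⟨by omega, h2⟩]
          · rw [if_neg (by rintro ⟨_, b, _⟩; exact h2 b), if_neg (by rintro ⟨_, b⟩; exact h2 b),
                if_neg (by rintro ⟨a, b⟩; omega)]
        · rw [if_neg (by rintro ⟨a, _, _⟩; exact hcc a)]
          by_cases h1 : c' < m ∧ n ≤ r + c' + 1
          · rw [if_pos h1, if_pos ⟨by omega, h1.2⟩]
          · rw [if_neg h1, if_neg (by rintro ⟨a, b⟩; exact h1 ⟨by omega, b⟩)]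
      · rw [show pvTri m + (n - (n - 1 - m)) = pvTri (m + 1) by simp only [pvTri]; omega]

-- ===== VERDICT (by name: the statement is the Claim_ definition above) =====
theorem dataTriangleBuider_spec : Claim_equal_dataTriangleBuider := by
  intro data gridsize _hdom _hpre
  unfold Spec_dataTriangleBuider dataTriangleBuider dataTriangleBuider_alt
  by_cases hg : gridsize ≤ 0
  · simp [PySem.List.pyRange_one_eq_nil (by omega : gridsize ≤ (0:Int))]
  · push_neg at hg
    obtain ⟨n, hn⟩ : ∃ n : Nat, gridsize = (n : Int) := ⟨gridsize.toNat, by omega⟩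
    subst hn
    rw [PySem.List.pyRange_one]
    simp only [Int.sub_zero, Int.toNat_natCast, zero_add, List.foldl_map, List.map_map,
      Function.comp_def]
    rw [initA_grid n n le_rfl, fillA_all (PySem.Str.split₀ data) n n le_rfl]
    apply List.map_congr_left; intro r hr
    rw [List.mem_range] at hr
    apply List.map_congr_left; intro c hc
    rw [List.mem_range] at hc
    by_cases h : r + c + 1 < n
    · rw [if_neg (by omega), if_pos (by omega)]
    · rw [if_pos ⟨hc, by omega⟩, if_neg (by omega)]
      have h2 : PySem.Int.floordiv ((c : Int) * ((c : Int) + 1)) 2 = ((pvTri c : Nat) : Int) := by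
        have h3 : ((c : Int) * ((c : Int) + 1)) = ((2 * pvTri c : Nat) : Int) := by
          rw [pvTri_eq]; push_cast; ring
        rw [h3, show (2 : Int) = ((2 : Nat) : Int) from rfl, PySem.Int.floordiv_natCast]
        congr 1
        omega
      rw [h2, show ((pvTri c : Nat) : Int) + (r : Int) + (c : Int) + 1 - (n : Int)
            = ((pvTri c + (r + c + 1 - n) : Nat) : Int) from by push_cast; omega,
          PySem.List.pyGetD_natCast]
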